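-- pv_equiv track=rewrite | github.com/Se2uP/Python_programming | Lab1/task6-8.py | max_consecutive_digits
-- ===== SOURCE A (Python) =====
-- def max_consecutive_digits(text: str) -> int:
--     max_count = 0
--     current = 0
--
--     for char in text:
--         if char.isdigit():
--             current += 1
--             if current > max_count:
--                 max_count = current
--         else:
--             current = 0
--
--     return max_count
-- ===== SOURCE B (Python) =====
-- def max_consecutive_digits(text: str) -> int:
--     best = 0
--     i = 0
--     n = len(text)
--     while i < n:
--         if text[i].isdigit():
--             j = i
--             while j < n and text[j].isdigit():
--                 j += 1
--             if j - i > best: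
--                 best = j - i
--             i = j
--         else:
--             i += 1
--     return best
-- ===== Notes on version B (the rewrite author's own statement) =====
-- stated objective: alternative
-- what changed: Replaces the per-character counter-with-reset state machine by a two-pointer run scan: on meeting a digit it measures the whole maximal digit run at once, records its length, and jumps past it.
import Mathlib
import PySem

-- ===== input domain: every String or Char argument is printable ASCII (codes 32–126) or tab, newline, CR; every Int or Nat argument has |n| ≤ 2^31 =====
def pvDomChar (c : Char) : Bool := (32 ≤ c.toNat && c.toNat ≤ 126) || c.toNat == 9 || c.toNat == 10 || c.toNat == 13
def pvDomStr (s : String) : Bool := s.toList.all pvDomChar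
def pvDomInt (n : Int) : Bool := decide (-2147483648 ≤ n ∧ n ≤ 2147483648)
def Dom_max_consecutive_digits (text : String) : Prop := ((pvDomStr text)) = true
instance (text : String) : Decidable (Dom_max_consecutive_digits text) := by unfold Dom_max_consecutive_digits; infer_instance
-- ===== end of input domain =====

-- B replaces A's per-character counter-with-reset state machine by a two-pointer run scan
-- (measure each maximal digit run at once and jump past it); same O(n) cost, alternative structure.



-- ===== PORT A =====
-- Port of A: single left fold over the characters carrying (max_count, current).
def max_consecutive_digits (text : String) : Int :=
  (text.toList.foldl
    (fun (s : Int × Int) ch =>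
      if PySem.Chars.isdigit ch then
        let cur := s.2 + 1
        (if cur > s.1 then cur else s.1, cur)
      else (s.1, 0))
    (0, 0)).1

-- ===== PORT B =====
-- Port of B: two-pointer run scan; at a digit, measure the whole maximal digit run
-- (the inner while loop = takeWhile/dropWhile), record it, and continue past it.
def pvScanB (best : Int) (l : List Char) : Int :=
  match l with
  | [] => best
  | x :: xs =>
    if PySem.Chars.isdigit x then
      let run : Int := (xs.takeWhile PySem.Chars.isdigit).length + 1
      pvScanB (if run > best then run else best) (xs.dropWhile PySem.Chars.isdigit)
    else
      pvScanB best xs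
termination_by l.length
decreasing_by
· exact Nat.lt_succ_of_le (List.length_dropWhile_le _ _)
· simp

def max_consecutive_digits_alt (text : String) : Int :=
  pvScanB 0 text.toList

-- ===== PRECONDITION & SPEC =====

def Spec_max_consecutive_digits (text : String) (out : Int) : Prop := out = max_consecutive_digits_alt text
instance (text : String) (out : Int) : Decidable (Spec_max_consecutive_digits text out) := by unfold Spec_max_consecutive_digits; infer_instance

-- ===== CLAIM (what is proved, stated in full; the proofs are below) =====
def Claim_equal_max_consecutive_digits : Prop := ∀ (text : String), Dom_max_consecutive_digits text → Spec_max_consecutive_digits text (max_consecutive_digits text)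

-- ===== LEMMAS AND PROOFS =====

-- A's running value from current count c, recursively.
def pvW (c : Int) : List Char → Int
  | [] => 0
  | x :: xs => if PySem.Chars.isdigit x then max (c + 1) (pvW (c + 1) xs) else pvW 0 xs

theorem pvFoldA_fst (l : List Char) : ∀ (m c : Int), 0 ≤ m →
    (l.foldl
      (fun (s : Int × Int) ch =>
        if PySem.Chars.isdigit ch then
          let cur := s.2 + 1
          (if cur > s.1 then cur else s.1, cur)
        else (s.1, 0)) (m, c)).1 = max m (pvW c l) := by
  induction l with
  | nil => intro m c hm; simp [pvW]; omega
  | cons x xs ih =>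
    intro m c hm
    by_cases hx : PySem.Chars.isdigit x
    · have hm' : (0 : Int) ≤ if c + 1 > m then c + 1 else m := by split_ifs <;> omega
      simp only [List.foldl_cons, hx, if_true]
      rw [ih _ _ hm']
      simp only [pvW, hx, if_true]
      split_ifs <;> omega
    · simp only [List.foldl_cons, hx, Bool.false_eq_true, if_false, pvW]
      exact ih _ _ hm

theorem pvScanB_acc (n : Nat) : ∀ (l : List Char), l.length ≤ n → ∀ (b : Int), 0 ≤ b →
    pvScanB b l = max b (pvScanB 0 l) := by
  induction n with
  | zero =>
    intro l hl b hb
    have h : l = [] := List.eq_nil_of_length_eq_zero (Nat.le_zero.mp hl)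
    subst h; simp [pvScanB]; omega
  | succ n ih =>
    intro l hl b hb
    match l with
    | [] => simp [pvScanB]; omega
    | x :: xs =>
      simp only [List.length_cons, Nat.succ_le_succ_iff] at hl
      by_cases hx : PySem.Chars.isdigit x
      · simp only [pvScanB, hx, if_true]
        have hd : (xs.dropWhile PySem.Chars.isdigit).length ≤ n :=
          le_trans (List.length_dropWhile_le _ _) hl
        have h1 := ih _ hd
          (if ((xs.takeWhile PySem.Chars.isdigit).length : Int) + 1 > 0 then
            ((xs.takeWhile PySem.Chars.isdigit).length : Int) + 1 else 0)
          (by split_ifs <;> omega)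
        have h2 := ih _ hd
          (if ((xs.takeWhile PySem.Chars.isdigit).length : Int) + 1 > b then
            ((xs.takeWhile PySem.Chars.isdigit).length : Int) + 1 else b)
          (by split_ifs <;> omega)
        rw [h2, h1]
        split_ifs <;> omega
      · simp only [pvScanB, hx, Bool.false_eq_true, if_false]
        exact ih xs hl b hb

theorem pvScanB_le (n : Nat) : ∀ (l : List Char), l.length ≤ n → ∀ (b : Int),
    b ≤ pvScanB b l := by
  induction n with
  | zero =>
    intro l hl b
    have h : l = [] := List.eq_nil_of_length_eq_zero (Nat.le_zero.mp hl)
    subst h; simp [pvScanB]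
  | succ n ih =>
    intro l hl b
    match l with
    | [] => simp [pvScanB]
    | x :: xs =>
      simp only [List.length_cons, Nat.succ_le_succ_iff] at hl
      by_cases hx : PySem.Chars.isdigit x
      · simp only [pvScanB, hx, if_true]
        have hd : (xs.dropWhile PySem.Chars.isdigit).length ≤ n :=
          le_trans (List.length_dropWhile_le _ _) hl
        have := ih _ hd (if ((xs.takeWhile PySem.Chars.isdigit).length : Int) + 1 > b
          then ((xs.takeWhile PySem.Chars.isdigit).length : Int) + 1 else b)
        split_ifs at this ⊢ <;> omega
      · simp only [pvScanB, hx, Bool.false_eq_true, if_false]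
        exact ih xs hl b

def pvHeadDig : List Char → Bool
  | [] => false
  | x :: _ => PySem.Chars.isdigit x

-- Main invariant: A's running value with current count c versus B's run scan.
theorem pvMain (n : Nat) : ∀ (l : List Char), l.length ≤ n → ∀ (c : Int),
    pvW c l = if pvHeadDig l then
        max (c + ((l.takeWhile PySem.Chars.isdigit).length : Int))
            (pvScanB 0 (l.dropWhile PySem.Chars.isdigit))
      else pvScanB 0 l := by
  induction n with
  | zero =>
    intro l hl c
    have h : l = [] := List.eq_nil_of_length_eq_zero (Nat.le_zero.mp hl)
    subst h; simp [pvW, pvHeadDig, pvScanB]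
  | succ n ih =>
    intro l hl c
    match l with
    | [] => simp [pvW, pvHeadDig, pvScanB]
    | x :: xs =>
      simp only [List.length_cons, Nat.succ_le_succ_iff] at hl
      by_cases hx : PySem.Chars.isdigit x
      · simp only [pvW, hx, if_true, pvHeadDig, List.takeWhile_cons, List.dropWhile_cons,
          List.length_cons]
        rw [ih xs hl (c + 1)]
        match xs with
        | [] => simp [pvHeadDig, pvScanB]
        | y :: ys =>
          by_cases hy : PySem.Chars.isdigit y
          · simp only [pvHeadDig, hy, if_true, List.takeWhile_cons, List.dropWhile_cons,
              List.length_cons]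
            push_cast
            omega
          · simp only [pvHeadDig, hy, if_false, List.takeWhile_cons, List.dropWhile_cons,
              Bool.false_eq_true, List.length_nil]
            push_cast
            omega
      · simp only [pvW, hx, if_false, pvHeadDig, Bool.false_eq_true]
        rw [ih xs hl 0]
        have hscan : pvScanB 0 (x :: xs) = pvScanB 0 xs := by
          simp [pvScanB, hx]
        rw [hscan]
        match xs with
        | [] => simp [pvHeadDig, pvScanB]
        | y :: ys =>
          by_cases hy : PySem.Chars.isdigit y
          · simp only [pvHeadDig, hy, if_true, List.takeWhile_cons, List.dropWhile_cons,
              List.length_cons]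
            have hrun : pvScanB 0 (y :: ys) =
                max (((ys.takeWhile PySem.Chars.isdigit).length : Int) + 1)
                  (pvScanB 0 (ys.dropWhile PySem.Chars.isdigit)) := by
              simp only [pvScanB, hy, if_true]
              rw [pvScanB_acc (ys.dropWhile PySem.Chars.isdigit).length _ le_rfl _
                (by split_ifs <;> omega)]
              split_ifs <;> omega
            rw [hrun]
            push_cast
            omega
          · simp [pvHeadDig, hy]

theorem pvW_eq_scan (l : List Char) : pvW 0 l = pvScanB 0 l := by
  rw [pvMain l.length l le_rfl 0]
  match l with
  | [] => simp [pvHeadDig, pvScanB]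
  | x :: xs =>
    by_cases hx : PySem.Chars.isdigit x
    · simp only [pvHeadDig, hx, if_true, List.takeWhile_cons, List.dropWhile_cons,
        List.length_cons]
      have hrun : pvScanB 0 (x :: xs) =
          max (((xs.takeWhile PySem.Chars.isdigit).length : Int) + 1)
            (pvScanB 0 (xs.dropWhile PySem.Chars.isdigit)) := by
        simp only [pvScanB, hx, if_true]
        rw [pvScanB_acc (xs.dropWhile PySem.Chars.isdigit).length _ le_rfl _
          (by split_ifs <;> omega)]
        split_ifs <;> omega
      rw [hrun]
      push_cast
      omega
    · simp [pvHeadDig, hx]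

-- ===== VERDICT
-- ===== VERDICT (by name: the statement is the Claim_ definition above) =====
theorem max_consecutive_digits_spec : Claim_equal_max_consecutive_digits := by
  intro text _
  unfold Spec_max_consecutive_digits max_consecutive_digits max_consecutive_digits_alt
  rw [pvFoldA_fst _ _ _ le_rfl, pvW_eq_scan]
  have h0 : (0 : Int) ≤ pvScanB 0 text.toList :=
    pvScanB_le text.toList.length text.toList le_rfl 0
  omega
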